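-- pv_equiv track=rewrite | github.com/ts207/solo | project/research/services/promotion_diagnostics.py | _classify_rejection
-- ===== SOURCE A (Python) =====
-- from typing import Any, Dict, List
--
-- def _primary_reject_reason(row: Dict[str, Any]) -> str:
--     primary = str(row.get("promotion_fail_reason_primary", "")).strip()
--     if primary:
--         return primary
--     reject_reason = str(row.get("reject_reason", "")).strip()
--     if not reject_reason:
--         return ""
--     return next((token for token in reject_reason.split("|") if token.strip()), "")
--
-- def _classify_rejection(row: Dict[str, Any], failed_stages: List[str]) -> str:
--     primary_gate = str(row.get("promotion_fail_gate_primary", "")).strip().lower()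
--     primary_reason = _primary_reject_reason(row).strip().lower()
--     reject_reason = str(row.get("reject_reason", "")).strip().lower()
--     weakest_fail_stage = str(row.get("weakest_fail_stage", "")).strip().lower()
--     combined = " ".join(
--         [primary_gate, primary_reason, reject_reason, weakest_fail_stage, " ".join(failed_stages)]
--     )
--
--     if any(
--         token in combined
--         for token in [
--             "spec hash mismatch",
--             "bridge_evaluation_failed",
--             "unlocked candidates",
--             "schema",
--             "contract",
--         ]
--     ):
--         return "contract_failure"
--     if any(
--         token in combined
--         for token in [
--             "negative_control_missing",
--             "failed_placebo_controls",
--             "hypothesis_audit",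
--             "missing_realized_oos_path",
--             "oos_insufficient_samples",
--             "oos_validation",
--             "confirmatory",
--             "validation",
--             "test_support",
--             "multiplicity_strict",
--         ]
--     ):
--         return "weak_holdout_support"
--     if any(
--         token in combined
--         for token in [
--             "expectancy",
--             "after_cost",
--             "turnover",
--             "retail",
--             "low_capital",
--             "dsr",
--             "economic",
--             "tradable",
--         ]
--     ):
--         return "weak_economics"
--     if any(
--         token in combined
--         for token in [
--             "baseline",
--             "complexity",
--             "placebo",
--             "timeframe_consensus",
--             "overlap",
--             "profile_correlation",
--             "regime_unstable",
--             "scope",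
--         ]
--     ):
--         return "scope_mismatch"
--     if failed_stages:
--         return "scope_mismatch"
--     return "unclassified"
-- ===== SOURCE B (Python) =====
-- # B: instead of token-driven substring searches (four any() cascades, each
-- # token scanned through the haystack), B walks the combined string once,
-- # position by position, and at each position consults a dict keyed by first
-- # character to find the tokens that could start there (checked with
-- # startswith at that offset), tracking the minimum category priority seen.
--
-- _TOKENS = [
--     ("spec hash mismatch", 0), ("bridge_evaluation_failed", 0),
--     ("unlocked candidates", 0), ("schema", 0), ("contract", 0),
--     ("negative_control_missing", 1), ("failed_placebo_controls", 1),
--     ("hypothesis_audit", 1), ("missing_realized_oos_path", 1),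
--     ("oos_insufficient_samples", 1), ("oos_validation", 1),
--     ("confirmatory", 1), ("validation", 1), ("test_support", 1),
--     ("multiplicity_strict", 1),
--     ("expectancy", 2), ("after_cost", 2), ("turnover", 2), ("retail", 2),
--     ("low_capital", 2), ("dsr", 2), ("economic", 2), ("tradable", 2),
--     ("baseline", 3), ("complexity", 3), ("placebo", 3),
--     ("timeframe_consensus", 3), ("overlap", 3), ("profile_correlation", 3),
--     ("regime_unstable", 3), ("scope", 3),
-- ]
--
-- _STARTERS = {}
-- for _tok, _pri in _TOKENS:
--     _STARTERS.setdefault(_tok[0], []).append((_tok, _pri))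
--
-- _NAMES = ["contract_failure", "weak_holdout_support",
--           "weak_economics", "scope_mismatch"]
--
--
-- def _classify_rejection(row, failed_stages):
--     primary = str(row.get("promotion_fail_reason_primary", "")).strip()
--     if not primary:
--         rr0 = str(row.get("reject_reason", "")).strip()
--         if rr0:
--             primary = next((t for t in rr0.split("|") if t.strip()), "")
--         else:
--             primary = ""
--     combined = " ".join([
--         str(row.get("promotion_fail_gate_primary", "")).strip().lower(),
--         primary.strip().lower(),
--         str(row.get("reject_reason", "")).strip().lower(),
--         str(row.get("weakest_fail_stage", "")).strip().lower(),
--         " ".join(failed_stages),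
--     ])
--     best = None
--     for i, ch in enumerate(combined):
--         for tok, pri in _STARTERS.get(ch, ()):
--             if combined.startswith(tok, i):
--                 best = pri if best is None else min(best, pri)
--     if best is not None:
--         return _NAMES[best]
--     return "scope_mismatch" if failed_stages else "unclassified"
-- ===== Notes on version B (the rewrite author's own statement) =====
-- stated objective: alternative
-- what changed: Token-driven substring cascades are replaced by a single position-driven left-to-right scan of the combined string: a dict keyed by first character dispatches to the tokens that could start at each position (checked with startswith at that offset), and the minimum matching category priority is tracked and mapped to the category name.
import Mathlib
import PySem

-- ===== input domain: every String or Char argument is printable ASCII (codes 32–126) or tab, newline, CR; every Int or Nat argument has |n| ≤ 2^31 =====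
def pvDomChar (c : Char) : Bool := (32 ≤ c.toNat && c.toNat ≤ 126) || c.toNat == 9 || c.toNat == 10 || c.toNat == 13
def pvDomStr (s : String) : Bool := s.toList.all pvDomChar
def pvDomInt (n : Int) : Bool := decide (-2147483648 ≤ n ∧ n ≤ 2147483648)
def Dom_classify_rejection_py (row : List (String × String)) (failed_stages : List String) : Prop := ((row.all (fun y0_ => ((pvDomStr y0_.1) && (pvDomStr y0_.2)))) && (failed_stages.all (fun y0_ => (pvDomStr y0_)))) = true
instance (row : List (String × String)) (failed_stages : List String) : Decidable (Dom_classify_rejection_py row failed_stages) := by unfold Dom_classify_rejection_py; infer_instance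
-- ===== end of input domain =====

-- B replaces A's token-driven any()-cascades by one position-driven scan of
-- the combined string with a first-character dispatch table, tracking the
-- minimum matching category priority (objective: alternative, same cost class).

-- ===== PORT A =====
def pvGetA (row : List (String × String)) (k : String) : String :=
  (PySem.Dict.mk row).getD k ""

def primaryRejectReasonA (row : List (String × String)) : String :=
  let primary := PySem.Str.strip (pvGetA row "promotion_fail_reason_primary")
  if primary ≠ "" then primary
  else
    let rr := PySem.Str.strip (pvGetA row "reject_reason")
    if rr = "" then ""
    else (((PySem.Str.split? rr "|").getD []).find? (fun t => PySem.Str.strip t != "")).getD ""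

def classify_rejection_py (row : List (String × String)) (failed_stages : List String) : String :=
  let primary_gate := PySem.Str.lower (PySem.Str.strip (pvGetA row "promotion_fail_gate_primary"))
  let primary_reason := PySem.Str.lower (PySem.Str.strip (primaryRejectReasonA row))
  let reject_reason := PySem.Str.lower (PySem.Str.strip (pvGetA row "reject_reason"))
  let weakest_fail_stage := PySem.Str.lower (PySem.Str.strip (pvGetA row "weakest_fail_stage"))
  let combined := PySem.Str.join " "
    [primary_gate, primary_reason, reject_reason, weakest_fail_stage,
     PySem.Str.join " " failed_stages]
  if ["spec hash mismatch", "bridge_evaluation_failed", "unlocked candidates", "schema",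
      "contract"].any (fun t => PySem.Str.isIn t combined) then
    "contract_failure"
  else if ["negative_control_missing", "failed_placebo_controls", "hypothesis_audit",
      "missing_realized_oos_path", "oos_insufficient_samples", "oos_validation",
      "confirmatory", "validation", "test_support",
      "multiplicity_strict"].any (fun t => PySem.Str.isIn t combined) then
    "weak_holdout_support"
  else if ["expectancy", "after_cost", "turnover", "retail", "low_capital", "dsr",
      "economic", "tradable"].any (fun t => PySem.Str.isIn t combined) then
    "weak_economics"
  else if ["baseline", "complexity", "placebo", "timeframe_consensus", "overlap",
      "profile_correlation", "regime_unstable",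
      "scope"].any (fun t => PySem.Str.isIn t combined) then
    "scope_mismatch"
  else if !failed_stages.isEmpty then "scope_mismatch"
  else "unclassified"

-- ===== PORT B =====
def pvGetB (row : List (String × String)) (k : String) : String :=
  (PySem.Dict.mk row).getD k ""

def altTokens : List (String × Nat) :=
  [("spec hash mismatch", 0), ("bridge_evaluation_failed", 0),
   ("unlocked candidates", 0), ("schema", 0), ("contract", 0),
   ("negative_control_missing", 1), ("failed_placebo_controls", 1),
   ("hypothesis_audit", 1), ("missing_realized_oos_path", 1),
   ("oos_insufficient_samples", 1), ("oos_validation", 1),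
   ("confirmatory", 1), ("validation", 1), ("test_support", 1),
   ("multiplicity_strict", 1),
   ("expectancy", 2), ("after_cost", 2), ("turnover", 2), ("retail", 2),
   ("low_capital", 2), ("dsr", 2), ("economic", 2), ("tradable", 2),
   ("baseline", 3), ("complexity", 3), ("placebo", 3),
   ("timeframe_consensus", 3), ("overlap", 3), ("profile_correlation", 3),
   ("regime_unstable", 3), ("scope", 3)]

-- _STARTERS.get(ch, ()): the tokens whose first character is ch, in table order
def altStarters (c : Char) : List (String × Nat) :=
  altTokens.filter (fun p => p.1.toList.head? == some c)

def altNames : List String :=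
  ["contract_failure", "weak_holdout_support", "weak_economics", "scope_mismatch"]

-- best = pri if best is None else min(best, pri)
def omin : Option Nat → Option Nat → Option Nat
  | none, y => y
  | some i, none => some i
  | some i, some j => some (min i j)

-- inner loop body: startswith(tok, i) then update the running minimum
def altUpd (s : List Char) (b : Option Nat) (p : String × Nat) : Option Nat :=
  if p.1.toList.isPrefixOf s then omin b (some p.2) else b

-- outer loop over positions of combined (as suffixes of its char list)
def altScan : List Char → Option Nat → Option Nat
  | [], b => b
  | c :: rest, b => altScan rest ((altStarters c).foldl (altUpd (c :: rest)) b)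

def altPrimary (row : List (String × String)) : String :=
  let primary := PySem.Str.strip (pvGetB row "promotion_fail_reason_primary")
  if primary ≠ "" then primary
  else
    let rr0 := PySem.Str.strip (pvGetB row "reject_reason")
    if rr0 ≠ "" then
      (((PySem.Str.split? rr0 "|").getD []).find? (fun t => PySem.Str.strip t != "")).getD ""
    else ""

def classify_rejection_py_alt (row : List (String × String)) (failed_stages : List String) : String :=
  let combined := PySem.Str.join " "
    [PySem.Str.lower (PySem.Str.strip (pvGetB row "promotion_fail_gate_primary")),
     PySem.Str.lower (PySem.Str.strip (altPrimary row)),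
     PySem.Str.lower (PySem.Str.strip (pvGetB row "reject_reason")),
     PySem.Str.lower (PySem.Str.strip (pvGetB row "weakest_fail_stage")),
     PySem.Str.join " " failed_stages]
  match altScan combined.toList none with
  | some i => altNames.getD i "unclassified"
  | none => if !failed_stages.isEmpty then "scope_mismatch" else "unclassified"

-- ===== PRECONDITION & SPEC =====
def Spec_classify_rejection_py (row : List (String × String)) (failed_stages : List String) (out : String) : Prop := out = classify_rejection_py_alt row failed_stages
instance (row : List (String × String)) (failed_stages : List String) (out : String) : Decidable (Spec_classify_rejection_py row failed_stages out) := by unfold Spec_classify_rejection_py; infer_instance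

-- ===== CLAIM (what is proved, stated in full; the proofs are below) =====
def Claim_equal_classify_rejection_py : Prop := ∀ (row : List (String × String)) (failed_stages : List String), Dom_classify_rejection_py row failed_stages → Spec_classify_rejection_py row failed_stages (classify_rejection_py row failed_stages)

-- ===== LEMMAS AND PROOFS =====

-- the four category token groups
def pvG0 : List String := ["spec hash mismatch", "bridge_evaluation_failed",
  "unlocked candidates", "schema", "contract"]
def pvG1 : List String := ["negative_control_missing", "failed_placebo_controls",
  "hypothesis_audit", "missing_realized_oos_path", "oos_insufficient_samples",
  "oos_validation", "confirmatory", "validation", "test_support", "multiplicity_strict"]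
def pvG2 : List String := ["expectancy", "after_cost", "turnover", "retail",
  "low_capital", "dsr", "economic", "tradable"]
def pvG3 : List String := ["baseline", "complexity", "placebo", "timeframe_consensus",
  "overlap", "profile_correlation", "regime_unstable", "scope"]

theorem altTokens_eq_groups :
    altTokens = pvG0.map (·, 0) ++ pvG1.map (·, 1) ++ pvG2.map (·, 2) ++ pvG3.map (·, 3) := by
  rfl

theorem altTokens_nonempty : ∀ p ∈ altTokens, p.1.toList ≠ [] := by decide

-- the four-way priority cascade, abstracted over the four hit bits
def casc4 (b0 b1 b2 b3 : Bool) : Option Nat :=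
  if b0 then some 0 else if b1 then some 1 else if b2 then some 2 else if b3 then some 3 else none

theorem omin_none_left (x : Option Nat) : omin none x = x := rfl

theorem omin_assoc (x y z : Option Nat) : omin (omin x y) z = omin x (omin y z) := by
  cases x <;> cases y <;> cases z <;> simp [omin, Nat.min_assoc]

theorem omin_casc4 (a0 a1 a2 a3 b0 b1 b2 b3 : Bool) :
    omin (casc4 a0 a1 a2 a3) (casc4 b0 b1 b2 b3)
      = casc4 (a0 || b0) (a1 || b1) (a2 || b2) (a3 || b3) := by
  cases a0 <;> cases a1 <;> cases a2 <;> cases a3 <;>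
  cases b0 <;> cases b1 <;> cases b2 <;> cases b3 <;> decide

-- the foldl with altUpd factors through omin
theorem foldl_altUpd_omin (s : List Char) (ts : List (String × Nat)) :
    ∀ b, ts.foldl (altUpd s) b = omin b (ts.foldl (altUpd s) none) := by
  induction ts with
  | nil => intro b; cases b <;> rfl
  | cons p ts ih =>
      intro b
      simp only [List.foldl_cons, altUpd]
      split
      · simp only [omin_none_left]
        rw [ih (omin b (some p.2)), ih (some p.2), omin_assoc]
      · exact ih b

theorem altScan_omin (s : List Char) : ∀ b, altScan s b = omin b (altScan s none) := by
  induction s with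
  | nil => intro b; cases b <;> rfl
  | cons c rest ih =>
      intro b
      simp only [altScan]
      rw [foldl_altUpd_omin, ih (omin b _),
        ih ((altStarters c).foldl (altUpd (c :: rest)) none), omin_assoc]

-- tokens filtered out by the first-character dispatch never fire at this position
theorem foldl_starters_eq_table (c : Char) (rest : List Char) :
    (altStarters c).foldl (altUpd (c :: rest)) none
      = altTokens.foldl (altUpd (c :: rest)) none := by
  unfold altStarters
  have h : ∀ ts : List (String × Nat), (∀ p ∈ ts, p.1.toList ≠ []) → ∀ b,
      (ts.filter (fun p => p.1.toList.head? == some c)).foldl (altUpd (c :: rest)) b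
        = ts.foldl (altUpd (c :: rest)) b := by
    intro ts
    induction ts with
    | nil => intro _ b; rfl
    | cons p ts ih =>
        intro hne b
        by_cases hq : (p.1.toList.head? == some c) = true
        · simp only [List.filter_cons, hq, if_true]
          rw [List.foldl_cons, List.foldl_cons]
          exact ih (fun q hq' => hne q (List.mem_cons_of_mem _ hq')) _
        · simp only [List.filter_cons, hq]
          rw [List.foldl_cons]
          have hpre : p.1.toList.isPrefixOf (c :: rest) = false := by
            cases hl : p.1.toList with
            | nil => exact absurd hl (hne p List.mem_cons_self)
            | cons d l =>
                have hdc : d ≠ c := by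
                  rw [hl] at hq; simpa using hq
                simp [List.isPrefixOf, hdc]
          have : altUpd (c :: rest) b p = b := by simp [altUpd, hpre]
          rw [this]
          exact ih (fun q hq' => hne q (List.mem_cons_of_mem _ hq')) b
  exact h altTokens altTokens_nonempty none

-- a minimum already ≤ every upcoming priority is kept
theorem foldl_altUpd_keep (s : List Char) (i : Nat) (ts : List (String × Nat))
    (h : ∀ p ∈ ts, i ≤ p.2) : ts.foldl (altUpd s) (some i) = some i := by
  induction ts with
  | nil => rfl
  | cons p ts ih =>
      have hp : i ≤ p.2 := h p (by simp)
      have hrest : ∀ q ∈ ts, i ≤ q.2 := fun q hq => h q (by simp [hq])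
      simp only [List.foldl_cons, altUpd, omin]
      split
      · rw [show min i p.2 = i from Nat.min_eq_left hp]; exact ih hrest
      · exact ih hrest

-- one uniform-priority group from an empty accumulator
theorem foldl_altUpd_group (s : List Char) (j : Nat) (toks : List String) :
    (toks.map (·, j)).foldl (altUpd s) none
      = if toks.any (fun t => t.toList.isPrefixOf s) then some j else none := by
  induction toks with
  | nil => rfl
  | cons t ts ih =>
      simp only [List.map_cons, List.foldl_cons, List.any_cons, altUpd]
      by_cases h : t.toList.isPrefixOf s = true
      · simp only [h, if_true, Bool.true_or]
        exact foldl_altUpd_keep s j (ts.map (·, j)) (by simp)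
      · simp only [h, Bool.false_or]
        simpa using ih

-- the whole-table prefix fold at one position equals the cascade of prefix hits
theorem foldl_table_eq_casc (s : List Char) :
    altTokens.foldl (altUpd s) none
      = casc4 (pvG0.any (fun t => t.toList.isPrefixOf s))
              (pvG1.any (fun t => t.toList.isPrefixOf s))
              (pvG2.any (fun t => t.toList.isPrefixOf s))
              (pvG3.any (fun t => t.toList.isPrefixOf s)) := by
  rw [altTokens_eq_groups, List.foldl_append, List.foldl_append, List.foldl_append]
  unfold casc4
  by_cases h0 : pvG0.any (fun t => t.toList.isPrefixOf s) = true
  · rw [foldl_altUpd_group, if_pos h0, if_pos h0,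
      foldl_altUpd_keep s 0 _ (by simp), foldl_altUpd_keep s 0 _ (by simp),
      foldl_altUpd_keep s 0 _ (by simp)]
  · rw [foldl_altUpd_group, if_neg h0, if_neg h0]
    by_cases h1 : pvG1.any (fun t => t.toList.isPrefixOf s) = true
    · rw [foldl_altUpd_group, if_pos h1, if_pos h1,
        foldl_altUpd_keep s 1 _ (by simp), foldl_altUpd_keep s 1 _ (by simp)]
    · rw [foldl_altUpd_group, if_neg h1, if_neg h1]
      by_cases h2 : pvG2.any (fun t => t.toList.isPrefixOf s) = true
      · rw [foldl_altUpd_group, if_pos h2, if_pos h2,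
          foldl_altUpd_keep s 2 _ (by simp)]
      · rw [foldl_altUpd_group, if_neg h2, if_neg h2, foldl_altUpd_group]

-- isIn on a cons splits into a prefix hit plus isIn on the tail (nonempty token)
theorem isIn_cons_split (t : String) (_ht : t.toList ≠ []) (c : Char) (rest : List Char) :
    PySem.Chars.isIn t.toList (c :: rest)
      = (t.toList.isPrefixOf (c :: rest) || PySem.Chars.isIn t.toList rest) := by
  by_cases h : PySem.Chars.isIn t.toList (c :: rest) = true
  · rw [h]
    have hinf := (PySem.Chars.isIn_iff_infix _ _).mp h
    rcases (List.infix_cons_iff).mp hinf with hp | hi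
    · have : t.toList.isPrefixOf (c :: rest) = true := (List.isPrefixOf_iff_prefix).mpr hp
      simp [this]
    · have : PySem.Chars.isIn t.toList rest = true := (PySem.Chars.isIn_iff_infix _ _).mpr hi
      simp [this]
  · simp only [Bool.not_eq_true] at h
    rw [h]
    have hninf := (PySem.Chars.isIn_eq_false_iff _ _).mp h
    have hp : t.toList.isPrefixOf (c :: rest) = false := by
      by_contra hc
      simp only [Bool.not_eq_false] at hc
      exact hninf ((List.infix_cons_iff).mpr (Or.inl ((List.isPrefixOf_iff_prefix).mp hc)))
    have hi : PySem.Chars.isIn t.toList rest = false := by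
      by_contra hc
      simp only [Bool.not_eq_false] at hc
      exact hninf ((List.infix_cons_iff).mpr (Or.inr ((PySem.Chars.isIn_iff_infix _ _).mp hc)))
    simp [hp, hi]

theorem any_or_split (toks : List String) (hne : ∀ t ∈ toks, t.toList ≠ []) (c : Char) (rest : List Char) :
    toks.any (fun t => PySem.Chars.isIn t.toList (c :: rest))
      = (toks.any (fun t => t.toList.isPrefixOf (c :: rest))
         || toks.any (fun t => PySem.Chars.isIn t.toList rest)) := by
  induction toks with
  | nil => rfl
  | cons t ts ih =>
      simp only [List.any_cons]
      rw [isIn_cons_split t (hne t (by simp)) c rest,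
        ih (fun q hq => hne q (by simp [hq]))]
      cases t.toList.isPrefixOf (c :: rest) <;>
      cases PySem.Chars.isIn t.toList rest <;> simp

theorem pvG_nonempty :
    (∀ t ∈ pvG0, t.toList ≠ []) ∧ (∀ t ∈ pvG1, t.toList ≠ []) ∧
    (∀ t ∈ pvG2, t.toList ≠ []) ∧ (∀ t ∈ pvG3, t.toList ≠ []) := by decide

-- main characterisation of the position scan
theorem altScan_eq_casc (s : List Char) :
    altScan s none
      = casc4 (pvG0.any (fun t => PySem.Chars.isIn t.toList s))
              (pvG1.any (fun t => PySem.Chars.isIn t.toList s))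
              (pvG2.any (fun t => PySem.Chars.isIn t.toList s))
              (pvG3.any (fun t => PySem.Chars.isIn t.toList s)) := by
  induction s with
  | nil => decide
  | cons c rest ih =>
      show altScan rest ((altStarters c).foldl (altUpd (c :: rest)) none) = _
      rw [altScan_omin, ih, foldl_starters_eq_table, foldl_table_eq_casc, omin_casc4,
        ← any_or_split pvG0 pvG_nonempty.1 c rest,
        ← any_or_split pvG1 pvG_nonempty.2.1 c rest,
        ← any_or_split pvG2 pvG_nonempty.2.2.1 c rest,
        ← any_or_split pvG3 pvG_nonempty.2.2.2 c rest]

theorem str_isIn_toList (t s : String) :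
    PySem.Str.isIn t s = PySem.Chars.isIn t.toList s.toList := rfl

theorem pvGet_eq (row : List (String × String)) (k : String) : pvGetB row k = pvGetA row k := rfl

theorem altPrimary_eq (row : List (String × String)) :
    altPrimary row = primaryRejectReasonA row := by
  unfold altPrimary primaryRejectReasonA
  simp only [pvGet_eq]
  split
  · rfl
  · split <;> simp_all

-- the cascade over one combined string, generically
theorem cascade_eq_scan (c : String) (fs : List String) :
    (if pvG0.any (fun t => PySem.Str.isIn t c) then "contract_failure"
     else if pvG1.any (fun t => PySem.Str.isIn t c) then "weak_holdout_support"
     else if pvG2.any (fun t => PySem.Str.isIn t c) then "weak_economics"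
     else if pvG3.any (fun t => PySem.Str.isIn t c) then "scope_mismatch"
     else if !fs.isEmpty then "scope_mismatch" else "unclassified")
    = (match altScan c.toList none with
       | some i => altNames.getD i "unclassified"
       | none => if !fs.isEmpty then "scope_mismatch" else "unclassified") := by
  rw [altScan_eq_casc]
  simp only [← str_isIn_toList]
  unfold casc4
  by_cases h0 : pvG0.any (fun t => PySem.Str.isIn t c) = true
  · rw [if_pos h0, if_pos h0]; rfl
  · rw [if_neg h0, if_neg h0]
    by_cases h1 : pvG1.any (fun t => PySem.Str.isIn t c) = true
    · rw [if_pos h1, if_pos h1]; rfl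
    · rw [if_neg h1, if_neg h1]
      by_cases h2 : pvG2.any (fun t => PySem.Str.isIn t c) = true
      · rw [if_pos h2, if_pos h2]; rfl
      · rw [if_neg h2, if_neg h2]
        by_cases h3 : pvG3.any (fun t => PySem.Str.isIn t c) = true
        · rw [if_pos h3, if_pos h3]; rfl
        · rw [if_neg h3, if_neg h3]

-- ===== VERDICT (by name: the statement is the Claim_ definition above) =====
set_option maxHeartbeats 2000000 in
theorem classify_rejection_py_spec : Claim_equal_classify_rejection_py := by
  intro row failed_stages _
  unfold Spec_classify_rejection_py
  show classify_rejection_py row failed_stages = classify_rejection_py_alt row failed_stages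
  unfold classify_rejection_py classify_rejection_py_alt
  rw [altPrimary_eq, pvGet_eq, pvGet_eq, pvGet_eq]
  exact cascade_eq_scan
    (PySem.Str.join " "
      [PySem.Str.lower (PySem.Str.strip (pvGetA row "promotion_fail_gate_primary")),
       PySem.Str.lower (PySem.Str.strip (primaryRejectReasonA row)),
       PySem.Str.lower (PySem.Str.strip (pvGetA row "reject_reason")),
       PySem.Str.lower (PySem.Str.strip (pvGetA row "weakest_fail_stage")),
       PySem.Str.join " " failed_stages]) failed_stages
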